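-- pv_equiv track=rewrite | github.com/zjgcainiao/audiotown | src/audiotown/services/language.py | _count_in_ranges
-- ===== SOURCE A (Python) =====
-- def _count_in_ranges(s: str, ranges: list[tuple[int, int]]) -> int:
--     n = 0
--     for ch in s:
--         o = ord(ch)
--         for a, b in ranges:
--             if a <= o <= b:
--                 n += 1
--                 break
--     return n
-- ===== SOURCE B (Python) =====
-- def _count_in_ranges(s: str, ranges: list[tuple[int, int]]) -> int:
--     # Range-major sweep: walk the ranges once, each pass counting and removing
--     # the still-unmatched ordinals that fall in the current range, so every
--     # character is counted at most once (matching A's per-char `break`).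
--     total = 0
--     remaining = [ord(ch) for ch in s]
--     for a, b in ranges:
--         still = []
--         for o in remaining:
--             if a <= o <= b:
--                 total += 1
--             else:
--                 still.append(o)
--         remaining = still
--     return total
-- ===== Notes on version B (the rewrite author's own statement) =====
-- stated objective: alternative
-- what changed: B swaps the loop nesting: instead of scanning all ranges per character with a break, it sweeps the ranges once over a shrinking pool of ordinals, counting and removing each ordinal at its first matching range.
import Mathlib
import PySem

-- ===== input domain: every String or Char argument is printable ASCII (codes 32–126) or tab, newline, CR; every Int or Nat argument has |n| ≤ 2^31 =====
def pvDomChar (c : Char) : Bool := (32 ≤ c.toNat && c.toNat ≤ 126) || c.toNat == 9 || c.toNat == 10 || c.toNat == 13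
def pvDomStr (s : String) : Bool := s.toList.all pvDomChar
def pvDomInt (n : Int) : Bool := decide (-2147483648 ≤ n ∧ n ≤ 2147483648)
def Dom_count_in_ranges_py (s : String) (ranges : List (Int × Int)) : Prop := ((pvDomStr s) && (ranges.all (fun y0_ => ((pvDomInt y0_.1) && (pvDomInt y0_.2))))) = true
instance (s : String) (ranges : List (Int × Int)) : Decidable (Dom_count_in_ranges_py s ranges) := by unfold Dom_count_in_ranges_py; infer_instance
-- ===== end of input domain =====

-- B swaps the loop nesting of A (char-major scan with break → range-major sweep over a
-- shrinking pool of unmatched ordinals); objective: alternative algorithm, same result.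

-- ===== PORT A =====
-- inner `for a, b in ranges: if a <= o <= b: n += 1; break`
def pvInnerA (o : Int) (n : Int) : List (Int × Int) → Int
  | [] => n
  | (a, b) :: rest => if a ≤ o ∧ o ≤ b then n + 1 else pvInnerA o n rest

def count_in_ranges_py (s : String) (ranges : List (Int × Int)) : Int :=
  s.toList.foldl (fun n ch => pvInnerA (ch.toNat : Int) n ranges) 0

-- ===== PORT B =====
def count_in_ranges_py_alt (s : String) (ranges : List (Int × Int)) : Int :=
  let remaining : List Int := s.toList.map (fun ch => (ch.toNat : Int))
  (ranges.foldl
    (fun (st : Int × List Int) r =>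
      st.2.foldl
        (fun (st2 : Int × List Int) o =>
          if r.1 ≤ o ∧ o ≤ r.2 then (st2.1 + 1, st2.2) else (st2.1, st2.2 ++ [o]))
        (st.1, []))
    (0, remaining)).1

-- ===== PRECONDITION & SPEC =====
def Spec_count_in_ranges_py (s : String) (ranges : List (Int × Int)) (out : Int) : Prop := out = count_in_ranges_py_alt s ranges
instance (s : String) (ranges : List (Int × Int)) (out : Int) : Decidable (Spec_count_in_ranges_py s ranges out) := by unfold Spec_count_in_ranges_py; infer_instance

-- ===== CLAIM (what is proved, stated in full; the proofs are below) =====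
def Claim_equal_count_in_ranges_py : Prop := ∀ (s : String) (ranges : List (Int × Int)), Dom_count_in_ranges_py s ranges → Spec_count_in_ranges_py s ranges (count_in_ranges_py s ranges)

-- ===== LEMMAS AND PROOFS =====

def pvMatch (r : Int × Int) (o : Int) : Bool := decide (r.1 ≤ o ∧ o ≤ r.2)

def pvAnyM (rs : List (Int × Int)) (o : Int) : Bool := rs.any (fun r => pvMatch r o)

theorem pvInnerA_eq (o n : Int) (rs : List (Int × Int)) :
    pvInnerA o n rs = n + (if pvAnyM rs o then 1 else 0) := by
  induction rs with
  | nil => simp [pvInnerA, pvAnyM]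
  | cons r rest ih =>
    obtain ⟨a, b⟩ := r
    by_cases h : a ≤ o ∧ o ≤ b
    · simp [pvInnerA, pvAnyM, pvMatch, h]
    · simp only [pvInnerA, if_neg h, ih, pvAnyM, List.any_cons, pvMatch]
      simp only [decide_eq_false h, Bool.false_or]
      simp

theorem pvA_foldl (rs : List (Int × Int)) (l : List Char) (n : Int) :
    l.foldl (fun n ch => pvInnerA (ch.toNat : Int) n rs) n
      = n + (l.countP (fun ch => pvAnyM rs (ch.toNat : Int)) : Int) := by
  induction l generalizing n with
  | nil => simp
  | cons c l ih =>
    rw [List.foldl_cons, pvInnerA_eq, ih, List.countP_cons]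
    by_cases h : pvAnyM rs (c.toNat : Int) <;> simp [h] <;> push_cast <;> ring

theorem pvB_inner (r : Int × Int) (rem : List Int) (t : Int) (acc : List Int) :
    rem.foldl
        (fun (st2 : Int × List Int) o =>
          if r.1 ≤ o ∧ o ≤ r.2 then (st2.1 + 1, st2.2) else (st2.1, st2.2 ++ [o]))
        (t, acc)
      = (t + (rem.countP (pvMatch r) : Int), acc ++ rem.filter (fun o => !pvMatch r o)) := by
  induction rem generalizing t acc with
  | nil => simp
  | cons o rem ih =>
    by_cases h : r.1 ≤ o ∧ o ≤ r.2
    · rw [List.foldl_cons]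
      simp only [h, if_pos, and_self, ite_true]
      rw [ih, List.countP_cons, List.filter_cons]
      simp [pvMatch, h]
      push_cast; ring
    · rw [List.foldl_cons]
      simp only [h, ite_false, if_neg, not_false_iff]
      rw [ih, List.countP_cons, List.filter_cons]
      simp [pvMatch, h]

theorem pvCountP_split (r : Int × Int) (rs : List (Int × Int)) (l : List Int) :
    l.countP (pvAnyM (r :: rs))
      = l.countP (pvMatch r) + (l.filter (fun o => !pvMatch r o)).countP (pvAnyM rs) := by
  induction l with
  | nil => simp
  | cons o l ih =>
    rw [List.countP_cons, List.countP_cons, List.filter_cons]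
    by_cases h : pvMatch r o
    · have ha : pvAnyM (r :: rs) o = true := by simp [pvAnyM, h]
      simp [h, ha, ih]; omega
    · have ha : pvAnyM (r :: rs) o = pvAnyM rs o := by simp [pvAnyM, h]
      by_cases h2 : pvAnyM rs o <;>
        simp [h, ha, h2, ih, List.countP_cons] <;> omega

theorem pvB_main (rs : List (Int × Int)) (t : Int) (rem : List Int) :
    (rs.foldl
        (fun (st : Int × List Int) r =>
          st.2.foldl
            (fun (st2 : Int × List Int) o =>
              if r.1 ≤ o ∧ o ≤ r.2 then (st2.1 + 1, st2.2) else (st2.1, st2.2 ++ [o]))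
            (st.1, []))
        (t, rem)).1
      = t + (rem.countP (pvAnyM rs) : Int) := by
  induction rs generalizing t rem with
  | nil => simp [pvAnyM]
  | cons r rs ih =>
    simp only [List.foldl_cons]
    rw [pvB_inner, List.nil_append, ih, pvCountP_split]
    push_cast; ring

-- ===== VERDICT (by name: the statement is the Claim_ definition above) =====
theorem count_in_ranges_py_spec : Claim_equal_count_in_ranges_py := by
  intro s ranges _
  unfold Spec_count_in_ranges_py count_in_ranges_py count_in_ranges_py_alt
  rw [pvA_foldl, pvB_main, List.countP_map]
  rfl
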